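-- pv_equiv track=rewrite | github.com/mesk97/leetcode | 139. Word Break.py | initiate
-- ===== SOURCE A (Python) =====
-- def initiate(s, wordDict):
--     cache = dict()
--
--     for w in wordDict:
--         #indices = []
--         start = 0
--         while True:
--             index = s.find(w, start)
--             if index == -1:
--                 break
--             #indices.append(index)
--             if not (index in cache):
--                 cache[index] = set()
--             cache[index].add(len(w))
--             start = index + 1
--
--     return cache
-- ===== SOURCE B (Python) =====
-- def initiate(s, wordDict):
--     n = len(s)
--     cache = dict()
--     for w in wordDict:
--         m = len(w)
--         for i in range(n - m + 1):
--             if s.startswith(w, i):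
--                 cache.setdefault(i, set()).add(m)
--     return cache
-- ===== Notes on version B (the rewrite author's own statement) =====
-- stated objective: simpler
-- what changed: Replaces A's per-word `while True: s.find(w, start)` re-scanning loop with a direct position loop `for i in range(len(s)-len(w)+1)` testing `s.startswith(w, i)`, and folds A's contains-check/insert-empty-set/add into a single `cache.setdefault(i, set()).add(m)`.
import Mathlib
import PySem

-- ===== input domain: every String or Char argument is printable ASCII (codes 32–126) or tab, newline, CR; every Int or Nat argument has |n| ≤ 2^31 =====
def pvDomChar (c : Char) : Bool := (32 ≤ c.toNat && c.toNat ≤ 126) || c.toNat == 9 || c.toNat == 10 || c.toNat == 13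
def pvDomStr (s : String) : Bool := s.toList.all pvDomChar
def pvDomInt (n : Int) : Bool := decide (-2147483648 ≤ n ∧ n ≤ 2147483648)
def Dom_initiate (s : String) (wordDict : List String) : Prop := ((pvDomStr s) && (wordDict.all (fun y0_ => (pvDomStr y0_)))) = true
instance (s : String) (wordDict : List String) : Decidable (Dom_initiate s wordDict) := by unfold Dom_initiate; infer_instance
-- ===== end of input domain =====

-- B replaces A's per-word repeated `s.find` scanning by a direct position loop
-- (`for i in range(len(s)-len(w)+1): if s.startswith(w, i)`); objective: simpler.

-- ===== PORT A =====
-- A's `while True: index = s.find(w, start) …` loop; strings are handled as their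
-- character lists. `fuel` only makes the loop total: each iteration moves `start`
-- past the found index, so `len(s)+2-start` iterations always suffice.
def initFindLoop (cs w : List Char) (start fuel : Nat)
    (cache : PySem.Dict Int (PySem.Set Int)) : PySem.Dict Int (PySem.Set Int) :=
  match fuel with
  | 0 => cache
  | fuel + 1 =>
    let index := PySem.Chars.findFrom cs w (start : Int) none
    if index = -1 then cache
    else
      -- if not (index in cache): cache[index] = set()
      let cache1 := if cache.contains index then cache else cache.insert index PySem.Set.empty
      -- cache[index].add(len(w))
      let cache2 := cache1.insert index
        (PySem.Set.add (cache1.getD index PySem.Set.empty) (w.length : Int))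
      initFindLoop cs w (index.toNat + 1) fuel cache2

def initiate (s : String) (wordDict : List String) : List (Int × List Int) :=
  (wordDict.foldl
    (fun cache w => initFindLoop s.toList w.toList 0 (s.toList.length + 2) cache)
    PySem.Dict.empty).items

-- ===== PORT B =====
-- Source B: per word w, `for i in range(n - len(w) + 1): if s.startswith(w, i):
-- cache.setdefault(i, set()).add(len(w))` (setdefault-then-add is Dict.modify).
-- `s.startswith(w, i)` is ported as startswith on the dropped tail: exact for
-- 0 ≤ i ≤ len(s), which holds for every i produced by this loop's range.
def initiate_alt (s : String) (wordDict : List String) : List (Int × List Int) :=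
  let cs := s.toList
  let n := cs.length
  (wordDict.foldl
    (fun cache w =>
      let ws := w.toList
      let m := ws.length
      (PySem.List.pyRange 0 ((n : Int) - (m : Int) + 1) 1).foldl
        (fun cache i =>
          if PySem.Chars.startswith (cs.drop i.toNat) ws then
            PySem.Dict.modify cache i PySem.Set.empty
              (fun st => PySem.Set.add st (m : Int))
          else cache)
        cache)
    PySem.Dict.empty).items

-- ===== PRECONDITION & SPEC =====
def Spec_initiate (s : String) (wordDict : List String) (out : List (Int × List Int)) : Prop := out = initiate_alt s wordDict
instance (s : String) (wordDict : List String) (out : List (Int × List Int)) : Decidable (Spec_initiate s wordDict out) := by unfold Spec_initiate; infer_instance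

-- ===== CLAIM (what is proved, stated in full; the proofs are below) =====
def Claim_equal_initiate : Prop := ∀ (s : String) (wordDict : List String), Dom_initiate s wordDict → Spec_initiate s wordDict (initiate s wordDict)

-- ===== LEMMAS AND PROOFS =====

-- the canonical per-word update at (Nat) index i
def pvStep (m : Nat) (c : PySem.Dict Int (PySem.Set Int)) (i : Nat) : PySem.Dict Int (PySem.Set Int) :=
  c.insert (i : Int) (PySem.Set.add (c.getD (i : Int) PySem.Set.empty) (m : Int))

-- the indices (in increasing order) at which w matches in cs
def pvMatches (cs w : List Char) : List Nat :=
  (List.range (cs.length + 1)).filter (fun i => decide (w <+: cs.drop i))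

-- A's two-statement update (insert-empty-if-absent, then add) is one canonical insert
theorem pvUpdA_eq (cache : PySem.Dict Int (PySem.Set Int)) (k : Int) (m : Nat) :
    (if cache.contains k then cache else cache.insert k PySem.Set.empty).insert k
      (PySem.Set.add
        ((if cache.contains k then cache else cache.insert k PySem.Set.empty).getD k
          PySem.Set.empty) (m : Int))
    = cache.insert k (PySem.Set.add (cache.getD k PySem.Set.empty) (m : Int)) := by
  by_cases h : cache.contains k = true
  · simp [h]
  · simp only [Bool.not_eq_true] at h
    rw [if_neg (by simp [h]), PySem.Dict.getD_insert_self, PySem.Dict.insert_insert_self,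
      PySem.Dict.getD_of_not_contains cache PySem.Set.empty h]

-- find past the end of the string returns -1 (CPython quirk, kept by PySem)
theorem pvfindFrom_past (cs w : List Char) (k : Nat) (h : cs.length < k) :
    PySem.Chars.findFrom cs w (k : Int) none = -1 := by
  simp only [PySem.Chars.findFrom]
  rw [if_neg (by omega : ¬ ((k : Int) < 0)), if_pos (by exact_mod_cast h)]

-- A's find-loop is the fold of the canonical step over the match positions ≥ start
theorem pvLoopA (cs w : List Char) (fuel start : Nat)
    (cache : PySem.Dict Int (PySem.Set Int))
    (hs : start ≤ cs.length + 1) (hf : cs.length + 2 - start ≤ fuel) :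
    initFindLoop cs w start fuel cache
    = ((List.range' start (cs.length + 1 - start)).filter
          (fun i => decide (w <+: cs.drop i))).foldl (pvStep w.length) cache := by
  induction fuel generalizing start cache with
  | zero => exfalso; omega
  | succ fuel ih =>
    by_cases hpast : cs.length + 1 ≤ start
    · have hs1 : start = cs.length + 1 := by omega
      subst hs1
      rw [initFindLoop]
      rw [if_pos (pvfindFrom_past cs w _ (by omega))]
      simp
    · have hsn : start ≤ cs.length := by omega
      by_cases hneg : PySem.Chars.findFrom cs w (start : Int) none = -1
      · have hni : ¬ w <:+: cs.drop start :=
          (PySem.Chars.findFrom_natCast_eq_neg_one_iff cs w start hsn).mp hneg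
        have hfilter : (List.range' start (cs.length + 1 - start)).filter
            (fun i => decide (w <+: cs.drop i)) = [] := by
          rw [List.filter_eq_nil_iff]
          intro i hi hdec
          rw [decide_eq_true_eq] at hdec
          apply hni
          have hsi : start ≤ i := (List.mem_range'_1.mp hi).1
          have hdd : cs.drop i = (cs.drop start).drop (i - start) := by
            rw [List.drop_drop]
            congr 1
            omega
          rw [hdd] at hdec
          exact hdec.isInfix.trans (List.drop_suffix _ _).isInfix
        rw [initFindLoop, if_pos hneg, hfilter]
        rfl
      · obtain ⟨hge, hpre, hmin⟩ :=
          PySem.Chars.findFrom_natCast_spec cs w start hsn hneg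
        have hnn : (0 : Int) ≤ PySem.Chars.findFrom cs w (start : Int) none :=
          le_trans (by exact_mod_cast Nat.zero_le start) hge
        set j := (PySem.Chars.findFrom cs w (start : Int) none).toNat with hj
        have hji : (j : Int) = PySem.Chars.findFrom cs w (start : Int) none :=
          Int.toNat_of_nonneg hnn
        have hsj : start ≤ j := by
          have h := hge
          rw [← hji] at h
          exact_mod_cast h
        have hjn : j ≤ cs.length := by
          rcases Nat.eq_zero_or_pos w.length with hw0 | hwpos
          · have hwnil : w = [] := List.length_eq_zero_iff.mp hw0
            by_contra hlt
            push Not at hlt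
            exact hmin start le_rfl (by omega)
              (by simp [hwnil])
          · have hl := hpre.length_le
            rw [List.length_drop] at hl
            omega
        have hsplit : List.range' start (cs.length + 1 - start)
            = List.range' start (j - start) ++ List.range' j (cs.length + 1 - j) := by
          have happ := List.range'_append (s := start) (m := j - start)
            (n := cs.length + 1 - j) (step := 1)
          rw [show start + 1 * (j - start) = j from by omega] at happ
          rw [show cs.length + 1 - start = (j - start) + (cs.length + 1 - j) from by omega,
            ← happ]
        have hcons : List.range' j (cs.length + 1 - j) = j :: List.range' (j + 1) (cs.length - j) := by
          rw [show cs.length + 1 - j = (cs.length - j) + 1 from by omega, List.range'_succ]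
        have hfilter1 : (List.range' start (j - start)).filter
            (fun i => decide (w <+: cs.drop i)) = [] := by
          rw [List.filter_eq_nil_iff]
          intro i hi hdec
          rw [decide_eq_true_eq] at hdec
          have hm := List.mem_range'_1.mp hi
          exact hmin i hm.1 (by omega) hdec
        rw [initFindLoop, if_neg hneg]
        rw [hsplit, List.filter_append, hfilter1, List.nil_append, hcons,
          List.filter_cons_of_pos (by simpa using hpre), List.foldl_cons]
        rw [← hji, Int.toNat_natCast]
        simp only []
        rw [pvUpdA_eq cache (j : Int) w.length]
        rw [ih (j + 1) _ (by omega) (by omega)]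
        rw [show cs.length + 1 - (j + 1) = cs.length - j from by omega]
        rfl

-- B's per-word position loop is the same fold over the match positions
theorem pvLoopB (cs w : List Char) (cache : PySem.Dict Int (PySem.Set Int)) :
    (PySem.List.pyRange 0 ((cs.length : Int) - (w.length : Int) + 1) 1).foldl
      (fun cache i =>
        if PySem.Chars.startswith (cs.drop i.toNat) w then
          PySem.Dict.modify cache i PySem.Set.empty
            (fun st => PySem.Set.add st (w.length : Int))
        else cache)
      cache
    = (pvMatches cs w).foldl (pvStep w.length) cache := by
  by_cases hm : w.length ≤ cs.length
  · rw [show (cs.length : Int) - (w.length : Int) + 1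
        = ((cs.length - w.length + 1 : Nat) : Int) from by omega]
    rw [PySem.List.pyRange_zero_natCast, List.foldl_map]
    have hfun : ∀ (c : PySem.Dict Int (PySem.Set Int)),
        ∀ i ∈ List.range (cs.length - w.length + 1),
        (if PySem.Chars.startswith (cs.drop ((i : Nat) : Int).toNat) w then
          PySem.Dict.modify c ((i : Nat) : Int) PySem.Set.empty
            (fun st => PySem.Set.add st (w.length : Int))
        else c)
        = if w <+: cs.drop i then pvStep w.length c i else c := by
      intro c i _
      rw [Int.toNat_natCast]
      by_cases hp : w <+: cs.drop i
      · rw [if_pos ((PySem.Chars.startswith_iff _ _).mpr hp), if_pos hp]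
        rfl
      · rw [if_neg (fun h => hp ((PySem.Chars.startswith_iff _ _).mp h)), if_neg hp]
    rw [PySem.List.foldl_congr_mem _ _ _ cache hfun,
      PySem.List.foldl_ite_eq_foldl_filter]
    have hlist : (List.range (cs.length - w.length + 1)).filter
        (fun i => decide (w <+: cs.drop i)) = pvMatches cs w := by
      unfold pvMatches
      rw [List.range_eq_range', List.range_eq_range']
      have happ := List.range'_append (s := 0) (m := cs.length - w.length + 1)
        (n := w.length) (step := 1)
      rw [show 0 + 1 * (cs.length - w.length + 1) = cs.length - w.length + 1 from by omega]
        at happ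
      rw [show cs.length + 1 = (cs.length - w.length + 1) + w.length from by omega, ← happ,
        List.filter_append]
      have htail : (List.range' (cs.length - w.length + 1) w.length).filter
          (fun i => decide (w <+: cs.drop i)) = [] := by
        rw [List.filter_eq_nil_iff]
        intro i hi hdec
        rw [decide_eq_true_eq] at hdec
        have hl := hdec.length_le
        rw [List.length_drop] at hl
        have hmem := List.mem_range'_1.mp hi
        omega
      rw [htail, List.append_nil]
    rw [hlist]
  · have h1 : PySem.List.pyRange 0 ((cs.length : Int) - (w.length : Int) + 1) 1 = [] := by
      have hstop : ¬ ((0 : Int) < (cs.length : Int) - (w.length : Int) + 1) := by omega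
      simp [PySem.List.pyRange, hstop]
    have h2 : pvMatches cs w = [] := by
      unfold pvMatches
      rw [List.filter_eq_nil_iff]
      intro i hi hdec
      rw [decide_eq_true_eq] at hdec
      have hl := hdec.length_le
      rw [List.length_drop] at hl
      omega
    rw [h1, h2]
    rfl

-- ===== VERDICT (by name: the statement is the Claim_ definition above) =====
theorem initiate_spec : Claim_equal_initiate := by
  intro s wordDict _
  show initiate s wordDict = initiate_alt s wordDict
  unfold initiate initiate_alt
  congr 1
  apply PySem.List.foldl_congr_mem
  intro cache w _
  rw [pvLoopA s.toList w.toList (s.toList.length + 2) 0 cache (by omega) (by omega),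
    pvLoopB]
  simp [pvMatches, List.range_eq_range']
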